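-- pv_equiv track=rewrite | github.com/jhonhidalgoA/SGAPAv2.0 | secciones.py | reordenar_menu
-- ===== SOURCE A (Python) =====
-- ORDEN_DIAS = ["Lunes", "Martes", "Miércoles", "Jueves", "Viernes"]
--
-- ORDEN_CATEGORIAS = [
--     "Menú del día",
--     "Menú vegetariano",
--     "Menú alternativo",
--     "Complementos"
-- ]
--
-- def reordenar_menu(menu):
--     ordered = {}
--     for dia in ORDEN_DIAS:
--         if dia in menu:
--             ordered[dia] = {}
--
--             # Ordenar categorías dentro del día
--             for categoria in ORDEN_CATEGORIAS:
--                 if categoria in menu[dia]: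
--                     ordered[dia][categoria] = menu[dia][categoria]
--     return ordered
-- ===== SOURCE B (Python) =====
-- ORDEN_DIAS = ["Lunes", "Martes", "Miércoles", "Jueves", "Viernes"]
--
-- ORDEN_CATEGORIAS = [
--     "Menú del día",
--     "Menú vegetariano",
--     "Menú alternativo",
--     "Complementos"
-- ]
--
-- _DAY_RANK = {d: i for i, d in enumerate(ORDEN_DIAS)}
-- _CAT_RANK = {c: i for i, c in enumerate(ORDEN_CATEGORIAS)}
--
-- def reordenar_menu(menu):
--     out = {}
--     for dia in sorted((d for d in menu if d in _DAY_RANK), key=_DAY_RANK.__getitem__):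
--         platos = menu[dia]
--         out[dia] = {c: platos[c]
--                     for c in sorted((c for c in platos if c in _CAT_RANK),
--                                     key=_CAT_RANK.__getitem__)}
--     return out
-- ===== Notes on version B (the rewrite author's own statement) =====
-- stated objective: alternative
-- what changed: Instead of scanning the fixed ORDEN_DIAS/ORDEN_CATEGORIAS lists and probing each for membership in the dict, B builds rank indexes from the order lists once and sorts the dict's own keys (filtered to ranked ones) by rank, then copies values in that order.
import Mathlib
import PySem

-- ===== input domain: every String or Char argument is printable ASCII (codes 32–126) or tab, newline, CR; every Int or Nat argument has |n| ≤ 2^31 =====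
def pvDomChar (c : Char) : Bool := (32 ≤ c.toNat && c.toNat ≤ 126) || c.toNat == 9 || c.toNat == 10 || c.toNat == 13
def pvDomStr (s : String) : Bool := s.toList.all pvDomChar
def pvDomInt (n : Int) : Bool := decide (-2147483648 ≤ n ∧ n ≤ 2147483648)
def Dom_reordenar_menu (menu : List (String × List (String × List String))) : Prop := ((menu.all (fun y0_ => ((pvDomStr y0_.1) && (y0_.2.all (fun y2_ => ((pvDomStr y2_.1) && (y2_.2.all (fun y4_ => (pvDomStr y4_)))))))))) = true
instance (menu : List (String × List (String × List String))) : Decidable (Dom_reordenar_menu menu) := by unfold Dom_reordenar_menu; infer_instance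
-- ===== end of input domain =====

-- B re-implements the reorder by rank-indexing and sorting the dict's own keys instead of
-- scanning the fixed order lists and probing membership; same values, no speed claim.

-- ===== PORT A =====
def ORDEN_DIAS_L : List String := ["Lunes", "Martes", "Miércoles", "Jueves", "Viernes"]
def ORDEN_CATEGORIAS_L : List String :=
  ["Menú del día", "Menú vegetariano", "Menú alternativo", "Complementos"]

-- dict membership / indexing = first-match association-list lookup; '[dia]'/'[categoria]' are
-- only read when the key is present, so '.getD []' is exact; assigning a fresh dict key appends.
def reordenar_menu (menu : List (String × List (String × List String))) :
    List (String × List (String × List String)) :=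
  ORDEN_DIAS_L.foldl (fun ordered dia =>
    if (List.lookup dia menu).isSome then
      ordered ++ [(dia,
        ORDEN_CATEGORIAS_L.foldl (fun inner categoria =>
          if (List.lookup categoria ((List.lookup dia menu).getD [])).isSome then
            inner ++ [(categoria, (List.lookup categoria ((List.lookup dia menu).getD [])).getD [])]
          else inner) [])]
    else ordered) []

-- ===== PORT B =====
def pvDayRank : PySem.Dict String Int :=
  (PySem.List.enumerate ORDEN_DIAS_L).foldl (fun d p => d.insert p.2 p.1) PySem.Dict.empty
def pvCatRank : PySem.Dict String Int :=
  (PySem.List.enumerate ORDEN_CATEGORIAS_L).foldl (fun d p => d.insert p.2 p.1) PySem.Dict.empty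

def reordenar_menu_alt (menu : List (String × List (String × List String))) :
    List (String × List (String × List String)) :=
  (PySem.List.sorted ((menu.map Prod.fst).filter (fun d => pvDayRank.contains d))
      (fun d => pvDayRank.getD d 0)).map (fun dia =>
    let platos := (List.lookup dia menu).getD []
    (dia,
      (PySem.List.sorted ((platos.map Prod.fst).filter (fun c => pvCatRank.contains c))
          (fun c => pvCatRank.getD c 0)).map
        (fun categoria => (categoria, (List.lookup categoria platos).getD []))))

-- ===== PRECONDITION & SPEC =====
-- Pre_ excludes association lists with duplicate keys (outer or inner): such lists do not
-- represent any Python dict, so neither program's behaviour on them is specified.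
def Pre_reordenar_menu (menu : List (String × List (String × List String))) : Prop :=
  (menu.map Prod.fst).Nodup ∧ ∀ p ∈ menu, (p.2.map Prod.fst).Nodup
instance (menu : List (String × List (String × List String))) : Decidable (Pre_reordenar_menu menu) := by unfold Pre_reordenar_menu; infer_instance

def pvWitness_reordenar_menu : (List (String × List (String × List String))) :=
  [("Martes", [("Complementos", ["pan"]), ("Otro", [])]), ("Lunes", [])]

def Spec_reordenar_menu (menu : List (String × List (String × List String))) (out : List (String × List (String × List String))) : Prop := out = reordenar_menu_alt menu
instance (menu : List (String × List (String × List String))) (out : List (String × List (String × List String))) : Decidable (Spec_reordenar_menu menu out) := by unfold Spec_reordenar_menu; infer_instance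

-- ===== CLAIM (what is proved, stated in full; the proofs are below) =====
def Claim_equal_reordenar_menu : Prop := ∀ (menu : List (String × List (String × List String))), Dom_reordenar_menu menu → Pre_reordenar_menu menu → Spec_reordenar_menu menu (reordenar_menu menu)

-- ===== LEMMAS AND PROOFS =====

theorem pv_lookup_isSome_iff {α : Type} (m : List (String × α)) (k : String) :
    (List.lookup k m).isSome = true ↔ k ∈ m.map Prod.fst := by
  induction m with
  | nil => simp
  | cons p t ih =>
    by_cases h : k = p.1
    · simp [List.lookup, h]
    · have hb : (k == p.1) = false := beq_eq_false_iff_ne.mpr h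
      simp [List.lookup, hb, ih, h]

theorem pv_lookup_mem {α : Type} (m : List (String × α)) (k : String) (v : α)
    (h : List.lookup k m = some v) : (k, v) ∈ m := by
  induction m with
  | nil => simp at h
  | cons p t ih =>
    by_cases hk : p.1 = k
    · simp [List.lookup, hk] at h
      subst h hk
      simp
    · simp only [List.lookup, beq_eq_false_iff_ne.mpr (fun a => hk (Eq.symm a))] at h
      exact List.mem_cons_of_mem _ (ih h)

theorem pv_sorted_filter_eq {α : Type} (L : List String) (rk : PySem.Dict String Int)
    (hc : ∀ k, rk.contains k = decide (k ∈ L))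
    (hp : L.Pairwise (fun a b => rk.getD a 0 < rk.getD b 0))
    (m : List (String × α)) (hm : (m.map Prod.fst).Nodup) :
    PySem.List.sorted ((m.map Prod.fst).filter (fun k => rk.contains k)) (fun k => rk.getD k 0)
      = L.filter (fun d => (List.lookup d m).isSome) := by
  apply PySem.List.sorted_eq_of_perm_of_pairwise_lt
  · rw [List.perm_ext_iff_of_nodup]
    · intro a
      simp only [List.mem_filter, hc, decide_eq_true_eq, pv_lookup_isSome_iff]
      tauto
    · exact (hp.filter _).imp (fun h he => absurd (he ▸ h) (lt_irrefl _))
    · exact hm.filter _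
  · exact hp.filter _

theorem pv_dayRank_contains (k : String) :
    pvDayRank.contains k = decide (k ∈ ORDEN_DIAS_L) := by
  rw [Bool.eq_iff_iff]
  simp [pvDayRank, ORDEN_DIAS_L, PySem.List.enumerate, List.foldl,
    PySem.Dict.contains_insert, PySem.Dict.contains_empty]
  tauto

theorem pv_catRank_contains (k : String) :
    pvCatRank.contains k = decide (k ∈ ORDEN_CATEGORIAS_L) := by
  rw [Bool.eq_iff_iff]
  simp [pvCatRank, ORDEN_CATEGORIAS_L, PySem.List.enumerate, List.foldl,
    PySem.Dict.contains_insert, PySem.Dict.contains_empty]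
  tauto

theorem pv_dayRank_pairwise :
    ORDEN_DIAS_L.Pairwise (fun a b => pvDayRank.getD a 0 < pvDayRank.getD b 0) := by decide

theorem pv_catRank_pairwise :
    ORDEN_CATEGORIAS_L.Pairwise (fun a b => pvCatRank.getD a 0 < pvCatRank.getD b 0) := by decide

-- ===== VERDICT (by name: the statement is the Claim_ definition above) =====
theorem reordenar_menu_spec : Claim_equal_reordenar_menu := by
  intro menu _ hpre
  unfold Spec_reordenar_menu reordenar_menu reordenar_menu_alt
  rw [PySem.List.foldl_append_if, List.nil_append,
    pv_sorted_filter_eq ORDEN_DIAS_L pvDayRank pv_dayRank_contains pv_dayRank_pairwise menu hpre.1]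
  apply List.map_congr_left
  intro dia hdia
  rw [List.mem_filter] at hdia
  obtain ⟨platos, hlk⟩ := Option.isSome_iff_exists.mp hdia.2
  have hnod : (platos.map Prod.fst).Nodup := hpre.2 _ (pv_lookup_mem _ _ _ hlk)
  simp only [hlk, Option.getD_some]
  rw [PySem.List.foldl_append_if, List.nil_append,
    pv_sorted_filter_eq ORDEN_CATEGORIAS_L pvCatRank pv_catRank_contains pv_catRank_pairwise platos hnod]
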